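-- pv_equiv track=rewrite | github.com/CAMANEM/CE-TEC-2015 | Intro y Taller de Programacion/Examenes/Parciales 2014/III Parcial 2014/III Parcial.py | aux_pas
-- ===== SOURCE A (Python) =====
-- def aux_pas(M1,M2,final):
--     if M1[0]>M2[0]:
--         final.append('S')
--         M1[0]=M1[0]-1
--         return aux_pas(M1,M2,final)
--     elif M1[0]<M2[0]:
--         final.append('N')
--         M1[0]=M1[0]+1
--         return aux_pas(M1,M2,final)
--     else:
--         if M1[1]>M2[1]:
--             final.append('W')
--             M1[1]=M1[1]-1
--             return aux_pas(M1,M2,final)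
--         elif M1[1]<M2[1]:
--             final.append('E')
--             M1[1]=M1[1]+1
--             return aux_pas(M1,M2,final)
--         else:
--             return final
-- ===== SOURCE B (Python) =====
-- def aux_pas(M1, M2, final):
--     d0 = M2[0] - M1[0]
--     d1 = M2[1] - M1[1]
--     final += ['N' if d0 > 0 else 'S'] * abs(d0)
--     final += ['E' if d1 > 0 else 'W'] * abs(d1)
--     M1[0] = M2[0]
--     M1[1] = M2[1]
--     return final
-- ===== Notes on version B (the rewrite author's own statement) =====
-- stated objective: alternative
-- what changed: Replaces the one-step-per-call tail recursion (recursion-depth-limited in CPython) by a closed-form computation: the signed axis differences give the step counts, the path is built in one shot with list multiplication, and M1 is set to M2 directly.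
import Mathlib
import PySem

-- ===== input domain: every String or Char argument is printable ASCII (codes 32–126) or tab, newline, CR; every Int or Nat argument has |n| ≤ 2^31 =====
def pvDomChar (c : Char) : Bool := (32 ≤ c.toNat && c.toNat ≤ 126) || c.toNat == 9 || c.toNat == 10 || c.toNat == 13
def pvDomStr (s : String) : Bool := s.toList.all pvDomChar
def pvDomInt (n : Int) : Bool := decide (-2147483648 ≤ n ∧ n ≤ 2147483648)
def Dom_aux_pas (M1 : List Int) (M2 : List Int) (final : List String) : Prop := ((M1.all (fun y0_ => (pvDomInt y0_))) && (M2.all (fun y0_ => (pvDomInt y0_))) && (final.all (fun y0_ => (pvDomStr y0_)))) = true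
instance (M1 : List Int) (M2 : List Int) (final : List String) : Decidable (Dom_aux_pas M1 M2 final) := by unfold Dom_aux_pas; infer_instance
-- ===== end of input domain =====

-- B replaces the one-step-per-call tail recursion by a closed-form path built from the
-- signed axis differences (list multiplication), mutating M1 and `final` in place like A;
-- the equivalence proved here is about the return value.


-- ===== PORT A =====
-- Literal transliteration of A's tail recursion. Fuel (one unit per Python call, bounded
-- upfront by the Manhattan distance) and the `_ , _` fallback are totalization guards for
-- inputs on which Python raises (short lists are excluded by Pre_).
def aux_pasFuel : Nat → List Int → List Int → List String → List String
  | 0, _, _, final => final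
  | Nat.succ n, M1, M2, final =>
    match M1, M2 with
    | a :: c :: r1, b :: d :: r2 =>
      if a > b then aux_pasFuel n ((a - 1) :: c :: r1) (b :: d :: r2) (final ++ ["S"])
      else if a < b then aux_pasFuel n ((a + 1) :: c :: r1) (b :: d :: r2) (final ++ ["N"])
      else if c > d then aux_pasFuel n (a :: (c - 1) :: r1) (b :: d :: r2) (final ++ ["W"])
      else if c < d then aux_pasFuel n (a :: (c + 1) :: r1) (b :: d :: r2) (final ++ ["E"])
      else final
    | _, _ => final

def aux_pas (M1 : List Int) (M2 : List Int) (final : List String) : List String :=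
  aux_pasFuel
    ((((PySem.List.pyGet? M1 0).getD 0 - (PySem.List.pyGet? M2 0).getD 0).natAbs
      + ((PySem.List.pyGet? M1 1).getD 0 - (PySem.List.pyGet? M2 1).getD 0).natAbs) + 1)
    M1 M2 final

-- ===== PORT B =====
-- Transliteration of B: counts from the signed differences, path by replication.
-- The `.getD 0` totalizes indexing on short lists, on which Python raises (excluded by Pre_).
def aux_pas_alt (M1 : List Int) (M2 : List Int) (final : List String) : List String :=
  let d0 : Int := (PySem.List.pyGet? M2 0).getD 0 - (PySem.List.pyGet? M1 0).getD 0
  let d1 : Int := (PySem.List.pyGet? M2 1).getD 0 - (PySem.List.pyGet? M1 1).getD 0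
  final ++ List.replicate d0.natAbs (if d0 > 0 then "N" else "S")
        ++ List.replicate d1.natAbs (if d1 > 0 then "E" else "W")

-- ===== PRECONDITION & SPEC =====
-- Pre_ excludes exactly the inputs on which A raises IndexError: both lists need indices 0 and 1.
def Pre_aux_pas (M1 : List Int) (M2 : List Int) (final : List String) : Prop :=
  2 ≤ M1.length ∧ 2 ≤ M2.length
instance (M1 : List Int) (M2 : List Int) (final : List String) : Decidable (Pre_aux_pas M1 M2 final) := by unfold Pre_aux_pas; infer_instance
def pvWitness_aux_pas : List Int × List Int × List String := ([2, -1], [0, 3], ["X"])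
def Spec_aux_pas (M1 : List Int) (M2 : List Int) (final : List String) (out : List String) : Prop := out = aux_pas_alt M1 M2 final
instance (M1 : List Int) (M2 : List Int) (final : List String) (out : List String) : Decidable (Spec_aux_pas M1 M2 final out) := by unfold Spec_aux_pas; infer_instance

-- ===== CLAIM (what is proved, stated in full; the proofs are below) =====
def Claim_equal_aux_pas : Prop := ∀ (M1 : List Int) (M2 : List Int) (final : List String), Dom_aux_pas M1 M2 final → Pre_aux_pas M1 M2 final → Spec_aux_pas M1 M2 final (aux_pas M1 M2 final)

-- ===== LEMMAS AND PROOFS =====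

lemma alt_cons (a c : Int) (r1 : List Int) (b d : Int) (r2 : List Int) (final : List String) :
    aux_pas_alt (a :: c :: r1) (b :: d :: r2) final =
      final ++ List.replicate (b - a).natAbs (if b - a > 0 then "N" else "S")
            ++ List.replicate (d - c).natAbs (if d - c > 0 then "E" else "W") := by
  have h1 : (0:Int) ≤ (r1.length:Int) + 1 := by positivity
  have h2 : (0:Int) ≤ (r2.length:Int) + 1 := by positivity
  simp [aux_pas_alt, PySem.List.pyGet?, PySem.List.pyIdx?, h1, h2]

lemma aux_pas_eq_alt (n : Nat) (a c : Int) (r1 : List Int) (b d : Int) (r2 : List Int)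
    (final : List String) (hn : (a - b).natAbs + (c - d).natAbs < n) :
    aux_pasFuel n (a :: c :: r1) (b :: d :: r2) final = aux_pas_alt (a :: c :: r1) (b :: d :: r2) final := by
  induction n generalizing a c final with
  | zero => omega
  | succ n ih =>
    rw [alt_cons]
    by_cases h1 : a > b
    · simp only [aux_pasFuel, h1, if_true]
      have hlt : ((a - 1) - b).natAbs + (c - d).natAbs < n := by omega
      have hk : (b - a).natAbs = (b - (a - 1)).natAbs + 1 := by omega
      have hc1 : ¬ (b - a > 0) := by omega
      have hc2 : ¬ (b - (a - 1) > 0) := by omega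
      rw [ih (a - 1) c (final ++ ["S"]) hlt, alt_cons, hk]
      simp [hc1, hc2, List.replicate_succ, List.append_assoc]
      exact ⟨by omega, Or.inr (by rw [if_neg (by omega), if_neg (by omega)])⟩
    · by_cases h2 : a < b
      · simp only [aux_pasFuel, h1, h2, if_true, if_false]
        have hlt : ((a + 1) - b).natAbs + (c - d).natAbs < n := by omega
        have hk : (b - a).natAbs = (b - (a + 1)).natAbs + 1 := by omega
        have hc1 : b - a > 0 := by omega
        rw [ih (a + 1) c (final ++ ["N"]) hlt, alt_cons, hk]
        by_cases h3 : b - (a + 1) > 0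
        · simp [hc1, h3, List.replicate_succ, List.append_assoc]
          exact ⟨h2, Or.inr (by rw [if_pos (by omega), if_pos (by omega)])⟩
        · have hz : (b - (a + 1)).natAbs = 0 := by omega
          simp [hc1, h3, hz, List.replicate_succ, List.append_assoc]
          exact h2
      · have hab : a = b := by omega
        subst hab
        by_cases h3 : c > d
        · simp only [aux_pasFuel, lt_irrefl, if_false, h3, if_true]
          have hlt : (a - a).natAbs + ((c - 1) - d).natAbs < n := by omega
          have hk : (d - c).natAbs = (d - (c - 1)).natAbs + 1 := by omega
          have hc1 : ¬ (d - c > 0) := by omega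
          have hc2 : ¬ (d - (c - 1) > 0) := by omega
          rw [ih a (c - 1) (final ++ ["W"]) hlt, alt_cons, hk]
          simp [hc1, hc2, List.replicate_succ, List.append_assoc]
          exact ⟨by omega, Or.inr (by rw [if_neg (by omega), if_neg (by omega)])⟩
        · by_cases h4 : c < d
          · simp only [aux_pasFuel, lt_irrefl, if_false, h3, h4, if_true]
            have hlt : (a - a).natAbs + ((c + 1) - d).natAbs < n := by omega
            have hk : (d - c).natAbs = (d - (c + 1)).natAbs + 1 := by omega
            have hc1 : d - c > 0 := by omega
            rw [ih a (c + 1) (final ++ ["E"]) hlt, alt_cons, hk]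
            by_cases h5 : d - (c + 1) > 0
            · simp [hc1, h5, List.replicate_succ, List.append_assoc]
              exact ⟨h4, Or.inr (by rw [if_pos (by omega), if_pos (by omega)])⟩
            · have hz : (d - (c + 1)).natAbs = 0 := by omega
              simp [hc1, h5, hz, List.replicate_succ, List.append_assoc]
              exact h4
          · have hcd : c = d := by omega
            subst hcd
            have hz0 : (a - a).natAbs = 0 := by omega
            have hz1 : (c - c).natAbs = 0 := by omega
            simp only [aux_pasFuel, lt_irrefl, if_false]
            simp [hz0, hz1]

-- ===== VERDICT (by name: the statement is the Claim_ definition above) =====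
theorem aux_pas_spec : Claim_equal_aux_pas := by
  intro M1 M2 final _ hpre
  obtain ⟨h1, h2⟩ := hpre
  match M1, M2 with
  | a :: c :: r1, b :: d :: r2 =>
    show aux_pas (a :: c :: r1) (b :: d :: r2) final = _
    have hg : aux_pas (a :: c :: r1) (b :: d :: r2) final =
        aux_pasFuel ((a - b).natAbs + (c - d).natAbs + 1) (a :: c :: r1) (b :: d :: r2) final := by
      have e1 : (0:Int) ≤ (r1.length:Int) + 1 := by positivity
      have e2 : (0:Int) ≤ (r2.length:Int) + 1 := by positivity
      simp [aux_pas, PySem.List.pyGet?, PySem.List.pyIdx?, e1, e2]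
    rw [hg, aux_pas_eq_alt _ a c r1 b d r2 final (by omega)]
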